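-- pv_equiv track=rewrite | github.com/Ruslan515/Competitions | coding/Leetcode/Tasks/task_1171.py | remove_from_arr
-- ===== SOURCE A (Python) =====
-- from typing import List, Optional
--
-- def remove_from_arr(arr: List[int]) -> bool:
--     answer = True
--     n = len(arr)
--     for start in range(n):
--         sums = 0
--         label = False
--         for end in range(start + 1, n + 1):
--             sums = sum(arr[start: end])
--             if sums == 0:
--                 label = True
--                 break
--         if label:
--             del arr[start: end]
--             answer = False
--             break
--     return answer
-- ===== SOURCE B (Python) =====
-- def remove_from_arr(arr):
--     # Return-value equivalent to A: True iff arr has no nonempty contiguous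
--     # zero-sum subarray.  (A additionally deletes the found subarray from arr
--     # in place; B does not mutate its argument.)
--     seen = {0}
--     s = 0
--     for x in arr:
--         s += x
--         if s in seen:
--             return False
--         seen.add(s)
--     return True
-- ===== Notes on version B (the rewrite author's own statement) =====
-- stated objective: faster
-- what changed: Replaced the O(n^3) scan over all start/end pairs with slice re-summation by a single pass over running prefix sums stored in a hash set (a zero-sum subarray exists iff a prefix sum repeats).
import Mathlib
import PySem

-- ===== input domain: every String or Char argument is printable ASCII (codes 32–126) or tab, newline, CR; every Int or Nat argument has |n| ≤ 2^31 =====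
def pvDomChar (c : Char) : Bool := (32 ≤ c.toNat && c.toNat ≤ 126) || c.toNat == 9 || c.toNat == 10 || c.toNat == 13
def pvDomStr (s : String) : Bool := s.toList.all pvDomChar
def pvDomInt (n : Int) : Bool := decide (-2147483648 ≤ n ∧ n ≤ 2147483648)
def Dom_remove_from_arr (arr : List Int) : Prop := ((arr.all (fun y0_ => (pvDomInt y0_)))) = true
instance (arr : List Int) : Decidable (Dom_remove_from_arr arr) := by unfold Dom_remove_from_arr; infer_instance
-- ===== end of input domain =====

-- B replaces A's triple-nested slice-summing scan by one pass over prefix sums with a set;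
-- equivalence is about the RETURN value only (A also deletes the found subarray from arr in place, B does not mutate).

-- ===== PORT A =====
-- inner loop: 'for end in range(start+1, n+1): sums = sum(arr[start:end]); if sums == 0: break'
def pvAInner (arr : List Int) (start : Int) : List Int → Bool
  | [] => false
  | e :: rest =>
      if (PySem.List.slice arr (some start) (some e)).sum = 0 then true
      else pvAInner arr start rest

-- outer loop: 'for start in range(n): … if label: answer = False; break'
-- ('del arr[start:end]' mutates arr but cannot affect the returned bool: the loop breaks right after)
def pvAOuter (arr : List Int) : List Int → Bool
  | [] => true
  | s :: rest =>
      if pvAInner arr s (PySem.List.pyRange (s + 1) ((arr.length : Int) + 1) 1) then false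
      else pvAOuter arr rest

def remove_from_arr (arr : List Int) : Bool :=
  pvAOuter arr (PySem.List.pyRange 0 (arr.length : Int) 1)

-- ===== PORT B =====
def pvBGo (seen : PySem.Set Int) (s : Int) : List Int → Bool
  | [] => true
  | x :: rest =>
      if PySem.Set.contains seen (s + x) then false
      else pvBGo (PySem.Set.add seen (s + x)) (s + x) rest

def remove_from_arr_alt (arr : List Int) : Bool :=
  pvBGo (PySem.Set.ofList [(0 : Int)]) 0 arr

-- ===== PRECONDITION & SPEC =====
def Spec_remove_from_arr (arr : List Int) (out : Bool) : Prop := out = remove_from_arr_alt arr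
instance (arr : List Int) (out : Bool) : Decidable (Spec_remove_from_arr arr out) := by unfold Spec_remove_from_arr; infer_instance

-- ===== CLAIM (what is proved, stated in full; the proofs are below) =====
def Claim_equal_remove_from_arr : Prop := ∀ (arr : List Int), Dom_remove_from_arr arr → Spec_remove_from_arr arr (remove_from_arr arr)

-- ===== LEMMAS AND PROOFS =====

-- the running prefix sums produced after state s while consuming the list
def pvPref (s : Int) : List Int → List Int
  | [] => []
  | x :: rest => (s + x) :: pvPref (s + x) rest

lemma pvPref_eq (s : Int) (l : List Int) :
    pvPref s l = (List.range l.length).map (fun m => s + (l.take (m + 1)).sum) := by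
  induction l generalizing s with
  | nil => rfl
  | cons x t ih =>
      simp [pvPref, List.length_cons, List.range_succ_eq_map, ih (s + x),
        Function.comp, add_assoc]

lemma pvBGo_eq (seen : PySem.Set Int) (s : Int) (l : List Int) :
    pvBGo seen s l = true ↔ (∀ q ∈ pvPref s l, q ∉ seen) ∧ (pvPref s l).Nodup := by
  induction l generalizing seen s with
  | nil => simp [pvBGo, pvPref]
  | cons x t ih =>
      by_cases h : (s + x) ∈ seen
      · simp [pvBGo, pvPref, PySem.Set.contains, h]
      · simp only [pvBGo, pvPref, PySem.Set.contains]
        rw [if_neg (by simpa using h), ih, List.nodup_cons]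
        simp only [List.mem_cons, PySem.Set.mem_add]
        constructor
        · rintro ⟨h1, h2⟩
          exact ⟨fun q hq => hq.elim (fun e => e ▸ h) (fun hq' hm => h1 q hq' (Or.inl hm)),
                 fun hm => h1 _ hm (Or.inr rfl), h2⟩
        · rintro ⟨h1, h2, h3⟩
          exact ⟨fun q hq hm => hm.elim (h1 q (Or.inr hq)) (fun e => h2 (e ▸ hq)), h3⟩
  
lemma pvAInner_eq (arr : List Int) (s : Int) (es : List Int) :
    pvAInner arr s es = true ↔ ∃ e ∈ es, (PySem.List.slice arr (some s) (some e)).sum = 0 := by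
  induction es with
  | nil => simp [pvAInner]
  | cons e rest ih =>
      by_cases h : (PySem.List.slice arr (some s) (some e)).sum = 0
      · simp [pvAInner, h]
      · simp [pvAInner, h, ih]

lemma pvAOuter_eq (arr : List Int) (starts : List Int) :
    pvAOuter arr starts = true ↔
      ∀ s ∈ starts, pvAInner arr s (PySem.List.pyRange (s + 1) ((arr.length : Int) + 1) 1) = false := by
  induction starts with
  | nil => simp [pvAOuter]
  | cons s rest ih =>
      by_cases h : pvAInner arr s (PySem.List.pyRange (s + 1) ((arr.length : Int) + 1) 1) = true
      · simp [pvAOuter, h]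
      · rw [Bool.not_eq_true] at h
        simp [pvAOuter, h, ih]

-- prefix sum of the first k elements
def pvP (arr : List Int) (k : Nat) : Int := ((arr.take k).sum)

lemma pvSlice_sum (arr : List Int) (i j : Nat) (hij : i ≤ j) :
    ((arr.drop i).take (j - i)).sum = pvP arr j - pvP arr i := by
  have : arr.take j = arr.take i ++ (arr.drop i).take (j - i) := by
    have h2 := List.take_add (l := arr) (i := i) (j := j - i)
    rw [show i + (j - i) = j by omega] at h2
    exact h2
  unfold pvP
  rw [this, List.sum_append]
  ring

-- A = true iff all prefix sums P 0 .. P n are pairwise distinct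
lemma pvA_char (arr : List Int) :
    remove_from_arr arr = true ↔
      ∀ i j : Nat, i < j → j ≤ arr.length → pvP arr i ≠ pvP arr j := by
  rw [remove_from_arr, pvAOuter_eq]
  constructor
  · intro h i j hij hj
    have hs : (i : Int) ∈ PySem.List.pyRange 0 (arr.length : Int) 1 := by
      rw [PySem.List.mem_pyRange_one]; constructor <;> [positivity; exact_mod_cast Nat.lt_of_lt_of_le hij hj]
    have := h (i : Int) hs
    rw [← Bool.not_eq_true, pvAInner_eq] at this
    intro heq
    apply this
    refine ⟨(j : Int), ?_, ?_⟩
    · rw [PySem.List.mem_pyRange_one]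
      constructor
      · exact_mod_cast hij
      · exact_mod_cast Nat.lt_succ_of_le hj
    · rw [PySem.List.slice_natCast, pvSlice_sum arr i j (Nat.le_of_lt hij)]
      omega
  · intro h s hs
    rw [PySem.List.mem_pyRange_one] at hs
    rw [← Bool.not_eq_true, pvAInner_eq]
    rintro ⟨e, he, hsum⟩
    rw [PySem.List.mem_pyRange_one] at he
    obtain ⟨i, rfl⟩ : ∃ i : Nat, (i : Int) = s := ⟨s.toNat, Int.toNat_of_nonneg hs.1⟩
    obtain ⟨j, rfl⟩ : ∃ j : Nat, (j : Int) = e :=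
      ⟨e.toNat, Int.toNat_of_nonneg (by omega)⟩
    obtain ⟨he1, he2⟩ := he
    have hij : i < j := by omega
    have hj : j ≤ arr.length := by omega
    rw [PySem.List.slice_natCast, pvSlice_sum arr i j (Nat.le_of_lt hij)] at hsum
    exact h i j hij hj (by omega)

-- B = true iff the same list [P 0, …, P n] has no duplicates
lemma pvB_char (arr : List Int) :
    remove_from_arr_alt arr = true ↔ ((List.range (arr.length + 1)).map (pvP arr)).Nodup := by
  rw [remove_from_arr_alt, pvBGo_eq]
  have hpref : pvPref 0 arr = (List.range arr.length).map (fun m => pvP arr (m + 1)) := by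
    rw [pvPref_eq]; simp [pvP]
  have hzero : pvP arr 0 = 0 := by simp [pvP]
  rw [List.range_succ_eq_map, List.map_cons, hzero, List.map_map, List.nodup_cons, hpref]
  constructor
  · rintro ⟨h1, h2⟩
    refine ⟨?_, ?_⟩
    · simp only [List.mem_map, Function.comp] at *
      rintro ⟨m, hm, heq⟩
      exact h1 _ ⟨m, hm, heq⟩ (by simp [PySem.Set.ofList])
    · simpa [Function.comp] using h2
  · rintro ⟨h1, h2⟩
    refine ⟨?_, by simpa [Function.comp] using h2⟩
    intro q hq hmem
    have : q = 0 := by simpa [PySem.Set.ofList] using hmem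
    subst this
    exact h1 (by simpa [Function.comp] using hq)

lemma pvNodup_map_range (f : Nat → Int) (n : Nat) :
    ((List.range n).map f).Nodup ↔ ∀ i j : Nat, i < j → j < n → f i ≠ f j := by
  rw [List.Nodup, List.pairwise_map, List.pairwise_iff_getElem]
  simp only [List.length_range, List.getElem_range]
  constructor
  · intro h i j hij hj; exact h i j (hij.trans hj) hj hij
  · intro h i j _ hj hij; exact h i j hij hj

-- ===== VERDICT (by name: the statement is the Claim_ definition above) =====
theorem remove_from_arr_spec : Claim_equal_remove_from_arr := by
  intro arr _
  unfold Spec_remove_from_arr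
  have hA := pvA_char arr
  have hB := (pvB_char arr).trans (pvNodup_map_range (pvP arr) (arr.length + 1))
  rcases hb : remove_from_arr_alt arr with _ | _
  · rw [Bool.eq_false_iff]
    intro hAtrue
    have hall := hA.mp hAtrue
    exact absurd (hb ▸ hB.mpr (fun i j hij hj => hall i j hij (by omega))) Bool.false_ne_true
  · rw [hA]
    intro i j hij hj
    exact hB.mp hb i j hij (by omega)
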